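-- pv_equiv track=rewrite | github.com/darrenjedwards/spdp-observer-p-vs-np | spdp_pipeline_sanity.py | simplify_clause
-- ===== SOURCE A (Python) =====
-- from typing import List, Tuple, Dict, Optional, Set
--
-- Lit = Tuple[int, bool]
--
-- Clause = List[Lit]
--
-- def lit_eval(l: Lit, assignment: Dict[int,int]) -> Optional[int]:
--     v, neg = l
--     if v not in assignment:
--         return None
--     val = assignment[v]
--     return (1 - val) if neg else val
--
-- def simplify_clause(cl: Clause, assignment: Dict[int,int]) -> Optional[Clause]:
--     new: Clause = []
--     for (v, neg) in cl:
--         ev = lit_eval((v, neg), assignment)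
--         if ev is None:
--             new.append((v, neg))
--         elif ev:
--             return None
--         else:
--             pass
--     return new
-- ===== SOURCE B (Python) =====
-- from typing import List, Tuple, Dict, Optional
--
-- Lit = Tuple[int, bool]
-- Clause = List[Lit]
--
-- def lit_eval(l: Lit, assignment: Dict[int,int]) -> Optional[int]:
--     v, neg = l
--     if v not in assignment:
--         return None
--     val = assignment[v]
--     return (1 - val) if neg else val
--
-- def simplify_clause(cl: Clause, assignment: Dict[int,int]) -> Optional[Clause]:
--     if any((ev := lit_eval(l, assignment)) is not None and ev for l in cl):
--         return None
--     return [l for l in cl if lit_eval(l, assignment) is None]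
-- ===== Notes on version B (the rewrite author's own statement) =====
-- stated objective: simpler
-- what changed: Replaces the fused accumulate-and-early-exit loop with two separate short-circuiting passes: one 'any' pass testing whether some literal is satisfied, then a filter keeping the unassigned literals.
import Mathlib
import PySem

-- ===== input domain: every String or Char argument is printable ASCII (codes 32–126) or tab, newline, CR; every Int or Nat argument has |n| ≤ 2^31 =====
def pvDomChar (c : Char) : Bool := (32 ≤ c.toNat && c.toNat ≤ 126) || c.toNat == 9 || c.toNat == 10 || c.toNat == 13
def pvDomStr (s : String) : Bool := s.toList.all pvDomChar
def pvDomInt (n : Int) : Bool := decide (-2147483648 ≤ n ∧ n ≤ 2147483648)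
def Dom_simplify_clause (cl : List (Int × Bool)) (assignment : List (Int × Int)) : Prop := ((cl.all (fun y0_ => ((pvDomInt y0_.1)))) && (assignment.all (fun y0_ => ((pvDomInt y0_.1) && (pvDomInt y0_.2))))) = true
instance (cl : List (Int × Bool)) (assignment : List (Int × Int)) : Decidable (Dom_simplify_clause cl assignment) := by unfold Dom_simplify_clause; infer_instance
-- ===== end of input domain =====

-- B replaces A's fused accumulate-and-early-exit loop by two separate short-circuiting
-- passes (an 'any' satisfaction test, then a filter of the unassigned literals); objective: simpler.

-- ===== PORT A =====
-- helper lit_eval, shared by both Pythons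
def lit_eval (l : Int × Bool) (assignment : List (Int × Int)) : Option Int :=
  match (PySem.Dict.mk assignment).get? l.1 with
  | none => none
  | some val => some (if l.2 then 1 - val else val)

-- A's loop: accumulator `new`, early return None when a literal evaluates truthy
def simplifyLoopA (assignment : List (Int × Int)) :
    List (Int × Bool) → List (Int × Bool) → Option (List (Int × Bool))
  | new, [] => some new
  | new, l :: rest =>
    match lit_eval l assignment with
    | none => simplifyLoopA assignment (new ++ [l]) rest
    | some ev => if ev ≠ 0 then none else simplifyLoopA assignment new rest

def simplify_clause (cl : List (Int × Bool)) (assignment : List (Int × Int)) : Option (List (Int × Bool)) :=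
  simplifyLoopA assignment [] cl

-- ===== PORT B =====
-- B's satisfaction test on one literal (the predicate of its 'any' pass)
def litSat (l : Int × Bool) (assignment : List (Int × Int)) : Bool :=
  match lit_eval l assignment with
  | some ev => ev ≠ 0
  | none => false

def simplify_clause_alt (cl : List (Int × Bool)) (assignment : List (Int × Int)) : Option (List (Int × Bool)) :=
  if cl.any (fun l => litSat l assignment) then
    none
  else
    some (cl.filter (fun l => (lit_eval l assignment).isNone))

-- ===== PRECONDITION & SPEC =====
def Spec_simplify_clause (cl : List (Int × Bool)) (assignment : List (Int × Int)) (out : Option (List (Int × Bool))) : Prop := out = simplify_clause_alt cl assignment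
instance (cl : List (Int × Bool)) (assignment : List (Int × Int)) (out : Option (List (Int × Bool))) : Decidable (Spec_simplify_clause cl assignment out) := by unfold Spec_simplify_clause; infer_instance

-- ===== CLAIM (what is proved, stated in full; the proofs are below) =====
def Claim_equal_simplify_clause : Prop := ∀ (cl : List (Int × Bool)) (assignment : List (Int × Int)), Dom_simplify_clause cl assignment → Spec_simplify_clause cl assignment (simplify_clause cl assignment)

-- ===== LEMMAS AND PROOFS =====
theorem litSat_none (l : Int × Bool) (assignment : List (Int × Int))
    (h : lit_eval l assignment = none) : litSat l assignment = false := by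
  simp [litSat, h]

theorem litSat_some (l : Int × Bool) (assignment : List (Int × Int)) (ev : Int)
    (h : lit_eval l assignment = some ev) : litSat l assignment = decide (ev ≠ 0) := by
  simp [litSat, h]

theorem simplifyLoopA_eq (assignment : List (Int × Int)) (cl new : List (Int × Bool)) :
    simplifyLoopA assignment new cl =
      if cl.any (fun l => litSat l assignment) then none
      else some (new ++ cl.filter (fun l => (lit_eval l assignment).isNone)) := by
  induction cl generalizing new with
  | nil => simp [simplifyLoopA]
  | cons l rest ih =>
    simp only [simplifyLoopA, List.any_cons, List.filter_cons]
    cases h : lit_eval l assignment with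
    | none =>
      rw [litSat_none l assignment h, Bool.false_or, ih]
      simp [List.append_assoc]
    | some ev =>
      rw [litSat_some l assignment ev h]
      by_cases hev : ev = 0
      · subst hev
        rw [ih, show (decide ¬(0:Int) = 0) = false from by decide, Bool.false_or]
        simp
        exact ih new
      · simp [hev]

-- ===== VERDICT (by name: the statement is the Claim_ definition above) =====
theorem simplify_clause_spec : Claim_equal_simplify_clause := by
  intro cl assignment _
  show simplify_clause cl assignment = simplify_clause_alt cl assignment
  simp [simplify_clause, simplify_clause_alt, simplifyLoopA_eq]
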